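-- pv_equiv track=rewrite | github.com/JosePazNoguera/pam | pam/planner/planner.py | get_tours
-- ===== SOURCE A (Python) =====
-- def get_tours(plan, target_act='home'):
--     """
--     Extract tours from an activity sequence
--     :params list plan: A sequence (list) of activities (ie ['home', 'escort_education', 'home', 'work', 'home'])
--     :params str target_act: The "base" of the tour (ie if target_act=='home', then it will home-based tours are returned)
--     """
--     tours = []
--     tour = None
--     for i, act in enumerate(plan):
--         if act == target_act:
--             if tour is not None:
--                 tours.append(tour)
--             tour = []
--         elif tour is not None:
--             tour.append(act)
--
--     return tours
-- ===== SOURCE B (Python) =====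
-- def get_tours(plan, target_act='home'):
--     tours = []
--     if target_act not in plan:
--         return tours
--     rest = plan[plan.index(target_act) + 1:]
--     while target_act in rest:
--         nxt = rest.index(target_act)
--         tours.append(rest[:nxt])
--         rest = rest[nxt + 1:]
--     return tours
-- ===== Notes on version B (the rewrite author's own statement) =====
-- stated objective: alternative
-- what changed: Replaces A's single pass with a per-element Optional accumulator by index-and-slice extraction: find the first target, then repeatedly take the slice up to the next target occurrence as one tour.
import Mathlib
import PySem

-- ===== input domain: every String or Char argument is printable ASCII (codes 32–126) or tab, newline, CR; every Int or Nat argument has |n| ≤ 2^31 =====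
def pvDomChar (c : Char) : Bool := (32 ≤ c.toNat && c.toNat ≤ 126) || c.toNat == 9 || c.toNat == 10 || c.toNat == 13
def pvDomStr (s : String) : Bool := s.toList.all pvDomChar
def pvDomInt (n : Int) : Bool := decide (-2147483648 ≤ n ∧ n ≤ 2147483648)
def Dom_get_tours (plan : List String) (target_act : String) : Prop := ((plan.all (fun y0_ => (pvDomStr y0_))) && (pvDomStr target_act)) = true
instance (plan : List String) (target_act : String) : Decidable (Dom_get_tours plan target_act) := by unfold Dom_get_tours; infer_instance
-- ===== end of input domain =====

-- B replaces A's per-element accumulator loop by index-and-slice extraction between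
-- consecutive occurrences of target_act; objective: alternative decomposition, same cost.

-- ===== PORT A =====
-- the loop state of A: (tours, tour) with tour = none for Python's `tour = None`
def gtStep (target_act : String) (st : List (List String) × Option (List String))
    (act : String) : List (List String) × Option (List String) :=
  if act = target_act then
    (match st.2 with
     | some t => st.1 ++ [t]
     | none => st.1, some [])
  else
    match st.2 with
    | some t => (st.1, some (t ++ [act]))
    | none => (st.1, none)

-- the enumerate index i is never used by A's body, so the fold runs over plan directly
def get_tours (plan : List String) (target_act : String) : List (List String) :=
  (plan.foldl (gtStep target_act) ([], none)).1

-- ===== PORT B =====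
-- the while loop of Source B: rest[:nxt] / rest[nxt+1:] are take/drop (0 ≤ nxt ≤ len rest, exact)
def gtLoop (rest : List String) (target_act : String) : List (List String) :=
  match h : PySem.List.index? rest target_act with
  | none => []
  | some n => rest.take n :: gtLoop (rest.drop (n + 1)) target_act
termination_by rest.length
decreasing_by
  obtain ⟨hk, -, -⟩ := PySem.List.getElem_of_index?_eq_some h
  simp [List.length_drop]; omega

def get_tours_alt (plan : List String) (target_act : String) : List (List String) :=
  match PySem.List.index? plan target_act with
  | none => []
  | some p => gtLoop (plan.drop (p + 1)) target_act

-- ===== PRECONDITION & SPEC =====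
def Spec_get_tours (plan : List String) (target_act : String) (out : List (List String)) : Prop := out = get_tours_alt plan target_act
instance (plan : List String) (target_act : String) (out : List (List String)) : Decidable (Spec_get_tours plan target_act out) := by unfold Spec_get_tours; infer_instance

-- ===== CLAIM (what is proved, stated in full; the proofs are below) =====
def Claim_equal_get_tours : Prop := ∀ (plan : List String) (target_act : String), Dom_get_tours plan target_act → Spec_get_tours plan target_act (get_tours plan target_act)

-- ===== LEMMAS AND PROOFS =====

theorem gtLoop_eq (rest : List String) (t : String) :
    gtLoop rest t = match PySem.List.index? rest t with
      | none => []
      | some n => rest.take n :: gtLoop (rest.drop (n + 1)) t := by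
  rw [gtLoop]
  cases h : PySem.List.index? rest t <;> simp [h]

-- the `tour is not None` phase of A's loop, characterised by B's loop
theorem foldl_some (rest : List String) (t : String) (tours : List (List String))
    (cur : List String) :
    (rest.foldl (gtStep t) (tours, some cur)).1 =
      tours ++ (match PySem.List.index? rest t with
        | none => []
        | some n => (cur ++ rest.take n) :: gtLoop (rest.drop (n + 1)) t) := by
  induction rest generalizing tours cur with
  | nil => simp [PySem.List.index?]
  | cons a rest ih =>
    by_cases ha : a = t
    · subst ha
      rw [PySem.List.index?_cons_self]
      simp only [List.foldl_cons, gtStep, if_true]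
      rw [ih]
      rw [gtLoop_eq]
      cases h : PySem.List.index? rest a <;> rw [PySem.List.index?_eq_idxOf?] at h <;> simp [h]
    · rw [PySem.List.index?_cons_of_ne rest ha]
      simp only [List.foldl_cons, gtStep, if_neg ha]
      rw [ih]
      cases h : PySem.List.index? rest t <;>
        simp [h, List.take_succ_cons, List.drop_succ_cons]

-- the `tour is None` phase of A's loop, up to the first occurrence of the target
theorem foldl_none (rest : List String) (t : String) (tours : List (List String)) :
    (rest.foldl (gtStep t) (tours, none)).1 =
      tours ++ (match PySem.List.index? rest t with
        | none => []
        | some p => gtLoop (rest.drop (p + 1)) t) := by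
  induction rest generalizing tours with
  | nil => simp [PySem.List.index?]
  | cons a rest ih =>
    by_cases ha : a = t
    · subst ha
      rw [PySem.List.index?_cons_self]
      simp only [List.foldl_cons, gtStep, if_true]
      rw [foldl_some]
      rw [gtLoop_eq]
      cases h : PySem.List.index? rest a <;> rw [PySem.List.index?_eq_idxOf?] at h <;> simp [h]
    · rw [PySem.List.index?_cons_of_ne rest ha]
      simp only [List.foldl_cons, gtStep, if_neg ha]
      rw [ih]
      cases h : PySem.List.index? rest t <;> simp [h, List.drop_succ_cons]

-- ===== VERDICT (by name: the statement is the Claim_ definition above) =====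
theorem get_tours_spec : Claim_equal_get_tours := by
  intro plan t _
  unfold Spec_get_tours get_tours get_tours_alt
  rw [foldl_none]
  cases h : PySem.List.index? plan t <;> simp [h]
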